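-- pv_equiv track=rewrite | github.com/Wassimakkariiii/trafficcars | distributed_traffic_gui.py | generate_conflict_groups
-- ===== SOURCE A (Python) =====
-- def generate_conflict_groups(n, group_size):
--     groups = []
--     used = set()
--     for i in range(n):
--         if i not in used:
--             group = [i]
--             for j in range(i + 1, n):
--                 if j not in used and len(group) < group_size:
--                     group.append(j)
--             groups.append(group)
--             used.update(group)
--     return groups
-- ===== SOURCE B (Python) =====
-- def generate_conflict_groups(n, group_size):
--     step = max(group_size, 1)
--     groups = []
--     start = 0
--     while start < n:
--         groups.append(list(range(start, min(start + step, n))))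
--         start += step
--     return groups
-- ===== Notes on version B (the rewrite author's own statement) =====
-- stated objective: faster
-- what changed: Replaces A's nested loops with a used-set (the inner loop scans all remaining indices for every group) by a single arithmetic chunking loop that emits range(start, min(start+step, n)) and advances start by step = max(group_size, 1).
import Mathlib
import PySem

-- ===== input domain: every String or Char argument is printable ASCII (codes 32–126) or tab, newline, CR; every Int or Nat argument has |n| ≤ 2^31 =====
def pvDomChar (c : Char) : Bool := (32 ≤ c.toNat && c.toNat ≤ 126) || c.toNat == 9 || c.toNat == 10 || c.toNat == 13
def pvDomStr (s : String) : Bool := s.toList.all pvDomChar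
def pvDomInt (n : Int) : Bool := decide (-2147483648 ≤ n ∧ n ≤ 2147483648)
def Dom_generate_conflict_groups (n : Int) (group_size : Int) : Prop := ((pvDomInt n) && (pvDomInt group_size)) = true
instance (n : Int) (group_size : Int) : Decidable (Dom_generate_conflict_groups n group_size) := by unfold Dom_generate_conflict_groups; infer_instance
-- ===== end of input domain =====

-- B replaces A's nested scans over a `used` set with one arithmetic chunking loop (start += max(group_size,1)); return values proved equal on all inputs.

-- ===== PORT A =====
-- one iteration of A's outer `for i in range(n)` loop; state = (groups, used)
def pvAStep (group_size n : Int) (st : List (List Int) × PySem.Set Int) (i : Int) :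
    List (List Int) × PySem.Set Int :=
  if i ∈ st.2 then st
  else
    let group :=
      (PySem.List.pyRange (i + 1) n 1).foldl
        (fun g j => if j ∉ st.2 ∧ (g.length : Int) < group_size then g ++ [j] else g) [i]
    (st.1 ++ [group], PySem.Set.update st.2 group)

def generate_conflict_groups (n : Int) (group_size : Int) : List (List Int) :=
  ((PySem.List.pyRange 0 n 1).foldl (pvAStep group_size n) ([], PySem.Set.empty)).1

-- ===== PORT B =====
-- B's `while start < n` loop; step = max(group_size, 1)
def pvBLoop (n group_size start : Int) (groups : List (List Int)) : List (List Int) :=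
  if start < n then
    pvBLoop n group_size (start + max group_size 1)
      (groups ++ [PySem.List.pyRange start (min (start + max group_size 1) n) 1])
  else groups
termination_by (n - start).toNat
decreasing_by
  have h := le_max_right group_size 1
  omega

def generate_conflict_groups_alt (n : Int) (group_size : Int) : List (List Int) :=
  pvBLoop n group_size 0 []

-- ===== PRECONDITION & SPEC =====
def Spec_generate_conflict_groups (n : Int) (group_size : Int) (out : List (List Int)) : Prop := out = generate_conflict_groups_alt n group_size
instance (n : Int) (group_size : Int) (out : List (List Int)) : Decidable (Spec_generate_conflict_groups n group_size out) := by unfold Spec_generate_conflict_groups; infer_instance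

-- ===== CLAIM (what is proved, stated in full; the proofs are below) =====
def Claim_equal_generate_conflict_groups : Prop := ∀ (n : Int) (group_size : Int), Dom_generate_conflict_groups n group_size → Spec_generate_conflict_groups n group_size (generate_conflict_groups n group_size)

-- ===== LEMMAS AND PROOFS =====

-- A's inner loop: starting from the consecutive block pyRange i (min a (i+step)),
-- scanning j = a .. n-1 over fresh (unused) indices fills the block up to min n (i+step).
lemma pv_inner_eq (group_size n i : Int) (used : PySem.Set Int) :
    ∀ (k : Nat) (a : Int), (n - a).toNat = k → i + 1 ≤ a → a ≤ n →
      (∀ j, a ≤ j → j < n → j ∉ used) →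
      (PySem.List.pyRange a n 1).foldl
          (fun g j => if j ∉ used ∧ (g.length : Int) < group_size then g ++ [j] else g)
          (PySem.List.pyRange i (min a (i + max group_size 1)) 1)
        = PySem.List.pyRange i (min n (i + max group_size 1)) 1 := by
  intro k
  induction k with
  | zero =>
    intro a hk ha han _
    have hna : a = n := by omega
    rw [PySem.List.pyRange_one_eq_nil (show n ≤ a by omega)]
    simp only [List.foldl_nil]
    rw [hna]
  | succ k ih =>
    intro a hk ha han hu
    have haln : a < n := by omega
    rw [PySem.List.pyRange_one_cons haln]
    simp only [List.foldl_cons]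
    have hlen : (PySem.List.pyRange i (min a (i + max group_size 1)) 1).length
        = ((min a (i + max group_size 1)) - i).toNat := PySem.List.length_pyRange_one _ _
    have hstep := max_cases group_size 1  -- step = gs (gs ≥ 1) ∨ step = 1 (gs < 1)
    have hnotmem : a ∉ used := hu a (le_refl a) haln
    by_cases hc : ((PySem.List.pyRange i (min a (i + max group_size 1)) 1).length : Int) < group_size
    · -- append a: the block grows by one
      rw [if_pos ⟨hnotmem, hc⟩]
      rw [hlen] at hc
      have hma : a < i + max group_size 1 := by
        rcases hstep with ⟨h1, _⟩ | ⟨h1, _⟩ <;> omega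
      have hmin : min a (i + max group_size 1) = a := by omega
      rw [hmin] at *
      have hgrow : PySem.List.pyRange i a 1 ++ [a] = PySem.List.pyRange i (a + 1) 1 :=
        (PySem.List.pyRange_one_succ_right (by omega)).symm
      rw [hgrow]
      have h' := ih (a + 1) (by omega) (by omega) (by omega)
        (fun j hj hjn => hu j (by omega) hjn)
      rw [show min (a + 1) (i + max group_size 1) = a + 1 by omega] at h'
      exact h'
    · -- block full: nothing appended, min unchanged
      rw [if_neg (by tauto)]
      rw [hlen] at hc
      have hfull : i + max group_size 1 ≤ a := by
        rcases hstep with ⟨h1, _⟩ | ⟨h1, _⟩ <;> omega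
      have h' := ih (a + 1) (by omega) (by omega) (by omega)
        (fun j hj hjn => hu j (by omega) hjn)
      rw [show min (a + 1) (i + max group_size 1) = min a (i + max group_size 1) by omega] at h'
      exact h'

-- A's outer loop skips indices already in `used`
lemma pv_skip_eq (group_size n : Int) (st : List (List Int) × PySem.Set Int) (l : List Int)
    (h : ∀ i ∈ l, i ∈ st.2) : l.foldl (pvAStep group_size n) st = st := by
  induction l with
  | nil => rfl
  | cons x xs ih =>
    simp only [List.foldl_cons]
    rw [show pvAStep group_size n st x = st from by
      unfold pvAStep; rw [if_pos (h x (by simp))]]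
    exact ih (fun i hi => h i (by simp [hi]))

-- main invariant: from a state whose `used` set contains no index ≥ start,
-- the rest of A's outer loop produces exactly B's chunks
lemma pv_outer_eq (group_size n : Int) :
    ∀ (k : Nat) (start : Int) (groups : List (List Int)) (used : PySem.Set Int),
      (n - start).toNat = k →
      (∀ j, start ≤ j → j < n → j ∉ used) →
      ((PySem.List.pyRange start n 1).foldl (pvAStep group_size n) (groups, used)).1
        = pvBLoop n group_size start groups := by
  intro k
  induction k using Nat.strong_induction_on with
  | _ k ih =>
    intro start groups used hk hu
    by_cases hlt : start < n
    · rw [PySem.List.pyRange_one_cons hlt]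
      simp only [List.foldl_cons]
      have hnotmem : start ∉ used := hu start (le_refl start) hlt
      have hstep := le_max_right group_size 1
      -- evaluate the step at `start`
      have hinit : PySem.List.pyRange start (min (start + 1) (start + max group_size 1)) 1
          = [start] := by
        rw [show min (start + 1) (start + max group_size 1) = start + 1 by omega]
        exact PySem.List.pyRange_one_singleton start
      have hgroup :
          (PySem.List.pyRange (start + 1) n 1).foldl
              (fun g j => if j ∉ used ∧ (g.length : Int) < group_size then g ++ [j] else g)
              [start]
            = PySem.List.pyRange start (min n (start + max group_size 1)) 1 := by
        rw [← hinit]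
        exact pv_inner_eq group_size n start used _ (start + 1) rfl (le_refl _) (by omega)
          (fun j hj hjn => hu j (by omega) hjn)
      have hstepeval : pvAStep group_size n (groups, used) start
          = (groups ++ [PySem.List.pyRange start (min n (start + max group_size 1)) 1],
             PySem.Set.update used (PySem.List.pyRange start (min n (start + max group_size 1)) 1)) := by
        unfold pvAStep
        rw [if_neg hnotmem]
        simp only
        rw [hgroup]
      rw [hstepeval]
      set m := min n (start + max group_size 1) with hm
      set used' := PySem.Set.update used (PySem.List.pyRange start m 1) with hused'
      have hm1 : start + 1 ≤ m := by omega
      have hm2 : m ≤ n := by omega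
      -- split the remaining range at m and skip the indices already grouped
      rw [PySem.List.pyRange_one_append (start + 1) m n hm1 hm2, List.foldl_append]
      rw [pv_skip_eq group_size n (groups ++ [PySem.List.pyRange start m 1], used')
        (PySem.List.pyRange (start + 1) m 1) (by
          intro i hi
          have hib := (PySem.List.mem_pyRange_one (x := i) (a := start + 1) (b := m)).1 hi
          show i ∈ used'
          rw [hused']
          exact (PySem.Set.mem_update _ _ _).2
            (Or.inr ((PySem.List.mem_pyRange_one).2 (by omega))))]
      have hu' : ∀ j, m ≤ j → j < n → j ∉ used' := by
        intro j hj hjn hmem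
        rcases (PySem.Set.mem_update _ _ _).1 hmem with h | h
        · exact hu j (by omega) hjn h
        · have := (PySem.List.mem_pyRange_one).1 h
          omega
      have hrec := ih (n - m).toNat (by omega) m
        (groups ++ [PySem.List.pyRange start m 1]) used' rfl hu'
      rw [hrec]
      -- relate pvBLoop at m with pvBLoop at start + step
      conv_rhs => rw [pvBLoop]
      rw [if_pos hlt, min_comm (start + max group_size 1) n, ← hm]
      by_cases hle : start + max group_size 1 ≤ n
      · rw [show m = start + max group_size 1 by omega]
      · rw [show m = n by omega, pvBLoop, if_neg (by omega), pvBLoop, if_neg (by omega)]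
    · rw [PySem.List.pyRange_one_eq_nil (by omega)]
      rw [pvBLoop, if_neg hlt]
      rfl

-- ===== VERDICT (by name: the statement is the Claim_ definition above) =====
theorem generate_conflict_groups_spec : Claim_equal_generate_conflict_groups := by
  intro n group_size _
  unfold Spec_generate_conflict_groups generate_conflict_groups generate_conflict_groups_alt
  exact pv_outer_eq group_size n (n - 0).toNat 0 [] PySem.Set.empty rfl
    (fun j _ _ h => by simp [PySem.Set.empty] at h)
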